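-- pv_equiv track=rewrite | github.com/meer-ahmed-m/ImpactAnalytics | GraduationProblem.py | getNofWays
-- ===== SOURCE A (Python) =====
-- def getNofWays(n):
--     #n=1==> 1 | 0 (absent:1 || total:2) (last day not attend - 1)
--     #we add a day before and calculate nof ways for every iteration
--     #n=2==> 11 | 01 | 10 | 00 (total:4 || absent:2 (10|00))
--     #n=3==> 111 | 011 | 101 | 001 | 110 | 010 | 100 (total:7 || absent:3) (000 as three consecutive days not valid)
--     """n=4==> from the first 4 combinations of n=3,
--     it is observed that it is same as n=2 with last day removed, so by adding a day result will become n=3(7) combinations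
--     | next 2 combinations, it is observed that it is same as n=1 with last 2 days removed,
--     so by adding a day result will become n=2(4) combinations
--     | next 1 combination, there can be 2 ways for a day to be inserted, so by adding a day result will become n=1(2) combinations
--     So, n=4 will be (n=3)+(n=2)+(n=1)
--     and so on..
--     """
--     absent = [1,2,3]
--     total = [2,4,7]
--     if(n<=0):
--         return 0,0
--     if(n<=3):
--         return absent[n-1],total[n-1]
--     while(n-3>0):
--         absent = absent[1:] + [sum(absent)]
--         total = total[1:] + [sum(total)]
--         n-=1
--     return absent[-1],total[-1]
-- ===== SOURCE B (Python) =====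
-- def getNofWays(n):
--     # Matrix exponentiation of the tribonacci-style recurrence: O(log n) instead of O(n).
--     if n <= 0:
--         return 0, 0
--     if n == 1:
--         return 1, 2
--     if n == 2:
--         return 2, 4
--     if n == 3:
--         return 3, 7
--     P = _mat_pow((0, 1, 0,
--                   0, 0, 1,
--                   1, 1, 1), n - 3)
--     # bottom row of P applied to the seed vectors gives the n-th terms
--     absent = P[6] * 1 + P[7] * 2 + P[8] * 3
--     total = P[6] * 2 + P[7] * 4 + P[8] * 7
--     return absent, total
--
-- def _mat_mul(x, y):
--     (a, b, c, d, e, f, g, h, i) = x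
--     (j, k, l, m, o, p, q, r, s) = y
--     return (a*j + b*m + c*q, a*k + b*o + c*r, a*l + b*p + c*s,
--             d*j + e*m + f*q, d*k + e*o + f*r, d*l + e*p + f*s,
--             g*j + h*m + i*q, g*k + h*o + i*r, g*l + h*p + i*s)
--
-- def _mat_pow(m, k):
--     if k == 0:
--         return (1, 0, 0, 0, 1, 0, 0, 0, 1)
--     h = _mat_pow(m, k // 2)
--     h2 = _mat_mul(h, h)
--     return h2 if k % 2 == 0 else _mat_mul(h2, m)
-- ===== Notes on version B (the rewrite author's own statement) =====
-- stated objective: faster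
-- what changed: Replaces the O(n) sliding-window list loop by O(log n) binary matrix exponentiation of the 3x3 companion matrix of the tribonacci-style recurrence.
import Mathlib
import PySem

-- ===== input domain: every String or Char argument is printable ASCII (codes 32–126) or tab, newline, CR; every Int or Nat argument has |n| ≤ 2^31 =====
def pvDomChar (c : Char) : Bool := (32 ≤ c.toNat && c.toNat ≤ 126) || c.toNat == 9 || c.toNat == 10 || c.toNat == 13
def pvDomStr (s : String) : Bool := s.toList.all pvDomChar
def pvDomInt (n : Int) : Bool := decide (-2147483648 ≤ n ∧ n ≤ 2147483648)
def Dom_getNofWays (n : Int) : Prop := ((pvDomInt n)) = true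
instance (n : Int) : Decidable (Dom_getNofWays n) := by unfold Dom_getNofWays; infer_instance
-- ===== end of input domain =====

-- B replaces A's O(n) sliding-window list loop by O(log n) binary matrix exponentiation; same return values.

-- ===== PORT A =====
-- the while loop: absent = absent[1:] + [sum(absent)]; total likewise; n -= 1
def getNofWaysLoop (absent total : List Int) (n : Int) : Int × Int :=
  if n - 3 > 0 then
    getNofWaysLoop (PySem.List.slice absent (some 1) none ++ [absent.sum])
                   (PySem.List.slice total (some 1) none ++ [total.sum]) (n - 1)
  else
    ((PySem.List.pyGet? absent (-1)).getD 0, (PySem.List.pyGet? total (-1)).getD 0)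
termination_by (n - 3).toNat
decreasing_by omega

def getNofWays (n : Int) : Int × Int :=
  let absent : List Int := [1, 2, 3]
  let total : List Int := [2, 4, 7]
  if n ≤ 0 then (0, 0)
  else if n ≤ 3 then
    ((PySem.List.pyGet? absent (n - 1)).getD 0, (PySem.List.pyGet? total (n - 1)).getD 0)
  else
    getNofWaysLoop absent total n

-- ===== PORT B =====
-- a 3x3 integer matrix (Source B's 9-tuple, row major)
structure Mat3 where
  a : Int
  b : Int
  c : Int
  d : Int
  e : Int
  f : Int
  g : Int
  h : Int
  i : Int
deriving DecidableEq, Repr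

def matMul (x y : Mat3) : Mat3 :=
  ⟨x.a*y.a + x.b*y.d + x.c*y.g, x.a*y.b + x.b*y.e + x.c*y.h, x.a*y.c + x.b*y.f + x.c*y.i,
   x.d*y.a + x.e*y.d + x.f*y.g, x.d*y.b + x.e*y.e + x.f*y.h, x.d*y.c + x.e*y.f + x.f*y.i,
   x.g*y.a + x.h*y.d + x.i*y.g, x.g*y.b + x.h*y.e + x.i*y.h, x.g*y.c + x.h*y.f + x.i*y.i⟩

def matId : Mat3 := ⟨1, 0, 0, 0, 1, 0, 0, 0, 1⟩

def matPow (m : Mat3) (k : Nat) : Mat3 :=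
  if k = 0 then matId
  else
    let h := matPow m (k / 2)
    let h2 := matMul h h
    if k % 2 = 0 then h2 else matMul h2 m
termination_by k
decreasing_by omega

def companion : Mat3 := ⟨0, 1, 0, 0, 0, 1, 1, 1, 1⟩

def getNofWays_alt (n : Int) : Int × Int :=
  if n ≤ 0 then (0, 0)
  else if n = 1 then (1, 2)
  else if n = 2 then (2, 4)
  else if n = 3 then (3, 7)
  else
    let P := matPow companion (n - 3).toNat
    (P.g * 1 + P.h * 2 + P.i * 3, P.g * 2 + P.h * 4 + P.i * 7)

-- ===== PRECONDITION & SPEC =====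
def Spec_getNofWays (n : Int) (out : Int × Int) : Prop := out = getNofWays_alt n
instance (n : Int) (out : Int × Int) : Decidable (Spec_getNofWays n out) := by unfold Spec_getNofWays; infer_instance

-- ===== CLAIM (what is proved, stated in full; the proofs are below) =====
def Claim_equal_getNofWays : Prop := ∀ (n : Int), Dom_getNofWays n → Spec_getNofWays n (getNofWays n)

-- ===== LEMMAS AND PROOFS =====

-- matrix applied to a column vector
def mvec (m : Mat3) (v : Int × Int × Int) : Int × Int × Int :=
  (m.a * v.1 + m.b * v.2.1 + m.c * v.2.2,
   m.d * v.1 + m.e * v.2.1 + m.f * v.2.2,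
   m.g * v.1 + m.h * v.2.1 + m.i * v.2.2)

-- k applications of the step (a,b,c) ↦ (b,c,a+b+c), innermost first
def iterStep : Nat → (Int × Int × Int) → (Int × Int × Int)
  | 0, v => v
  | k + 1, v => iterStep k (v.2.1, v.2.2, v.1 + v.2.1 + v.2.2)

def powRec (m : Mat3) : Nat → Mat3
  | 0 => matId
  | k + 1 => matMul (powRec m k) m

theorem mvec_matMul (x y : Mat3) (v : Int × Int × Int) :
    mvec (matMul x y) v = mvec x (mvec y v) := by
  simp only [mvec, matMul, Prod.mk.injEq]
  refine ⟨by ring, by ring, by ring⟩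

theorem matMul_assoc (x y z : Mat3) : matMul (matMul x y) z = matMul x (matMul y z) := by
  simp only [matMul, Mat3.mk.injEq]
  refine ⟨by ring, by ring, by ring, by ring, by ring, by ring, by ring, by ring, by ring⟩

theorem matMul_id (x : Mat3) : matMul x matId = x := by
  cases x
  simp only [matMul, matId, Mat3.mk.injEq]
  refine ⟨by ring, by ring, by ring, by ring, by ring, by ring, by ring, by ring, by ring⟩

theorem powRec_add (m : Mat3) (a b : Nat) :
    powRec m (a + b) = matMul (powRec m a) (powRec m b) := by
  induction b with
  | zero => simp only [Nat.add_zero, powRec, matMul_id]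
  | succ b ih =>
    show powRec m (a + b + 1) = _
    simp only [powRec, ih, matMul_assoc]

theorem matPow_eq_powRec (m : Mat3) (k : Nat) : matPow m k = powRec m k := by
  induction k using Nat.strong_induction_on with
  | _ k ih =>
    rw [matPow]
    by_cases hk : k = 0
    · simp [hk, powRec]
    · simp only [hk, if_false]
      rw [ih (k / 2) (by omega)]
      by_cases hp : k % 2 = 0
      · rw [if_pos hp, ← powRec_add, show k / 2 + k / 2 = k from by omega]
      · rw [if_neg hp, ← powRec_add]
        conv_rhs => rw [show k = k / 2 + k / 2 + 1 from by omega]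
        rfl

theorem mvec_powRec_iterStep (k : Nat) (v : Int × Int × Int) :
    mvec (powRec companion k) v = iterStep k v := by
  induction k generalizing v with
  | zero =>
    obtain ⟨x, y, z⟩ := v
    simp only [powRec, matId, mvec, iterStep]
    refine Prod.ext (by ring) (Prod.ext (by ring) (by ring))
  | succ k ih =>
    have hstep : mvec companion v = (v.2.1, v.2.2, v.1 + v.2.1 + v.2.2) := by
      obtain ⟨x, y, z⟩ := v
      simp only [mvec, companion]
      refine Prod.ext (by ring) (Prod.ext (by ring) (by ring))
    calc mvec (powRec companion (k + 1)) v
        = mvec (powRec companion k) (mvec companion v) := by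
          simp only [powRec, mvec_matMul]
      _ = iterStep (k + 1) v := by rw [hstep, ih]; rfl

-- A's loop state is always a 3-element list; it tracks iterStep's triple
theorem getNofWaysLoop_eq (k : Nat) : ∀ (n : Int), (n - 3).toNat = k →
    ∀ (a b c d e f : Int),
    getNofWaysLoop [a, b, c] [d, e, f] n =
      ((iterStep k (a, b, c)).2.2, (iterStep k (d, e, f)).2.2) := by
  induction k with
  | zero =>
    intro n hn a b c d e f
    rw [getNofWaysLoop, if_neg (by omega)]
    simp [iterStep, PySem.List.pyGet?_neg_one]
  | succ k ih =>
    intro n hn a b c d e f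
    rw [getNofWaysLoop, if_pos (by omega)]
    have hs : PySem.List.slice [a, b, c] (some 1) none = [b, c] := by
      simpa using PySem.List.slice_from_natCast (xs := [a, b, c]) (a := 1)
    have ht : PySem.List.slice [d, e, f] (some 1) none = [e, f] := by
      simpa using PySem.List.slice_from_natCast (xs := [d, e, f]) (a := 1)
    rw [hs, ht]
    simp only [List.sum_cons, List.sum_nil, add_zero, List.cons_append, List.nil_append]
    rw [show (a + (b + c)) = a + b + c from by ring,
        show (d + (e + f)) = d + e + f from by ring,
        show iterStep (k + 1) (a, b, c) = iterStep k (b, c, a + b + c) from rfl,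
        show iterStep (k + 1) (d, e, f) = iterStep k (e, f, d + e + f) from rfl]
    exact ih (n - 1) (by omega) b c (a + b + c) e f (d + e + f)

theorem getNofWays_eq_alt (n : Int) : getNofWays n = getNofWays_alt n := by
  by_cases h0 : n ≤ 0
  · simp [getNofWays, getNofWays_alt, h0]
  · by_cases h3 : n ≤ 3
    · interval_cases n <;> decide
    · rw [getNofWays, getNofWays_alt]
      rw [if_neg h0, if_neg h3, if_neg h0,
          if_neg (by omega : ¬ n = 1), if_neg (by omega : ¬ n = 2), if_neg (by omega : ¬ n = 3)]
      rw [getNofWaysLoop_eq (n - 3).toNat n rfl, matPow_eq_powRec,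
          ← mvec_powRec_iterStep (n - 3).toNat (1, 2, 3),
          ← mvec_powRec_iterStep (n - 3).toNat (2, 4, 7)]
      rfl

-- ===== VERDICT (by name: the statement is the Claim_ definition above) =====
theorem getNofWays_spec : Claim_equal_getNofWays := by
  intro n _
  unfold Spec_getNofWays
  exact getNofWays_eq_alt n
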